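-- pv_equiv track=rewrite | github.com/magzolich/Assignment_2 | duplicated_words.py | find_duplicates_in_word
-- ===== SOURCE A (Python) =====
-- def find_duplicates_in_word(word):
--     dict = {}
--     for letter in word:
--         if letter in dict:
--             return True
--         else:
--             dict[letter] = 1
--     return False
-- ===== SOURCE B (Python) =====
-- def find_duplicates_in_word(word):
--     return len(set(word)) != len(word)
-- ===== Notes on version B (the rewrite author's own statement) =====
-- stated objective: simpler
-- what changed: Replaced the dict-scanning loop with an early return by a single comparison of the deduplicated character count against the string length (len(set(word)) != len(word)).
import Mathlib
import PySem

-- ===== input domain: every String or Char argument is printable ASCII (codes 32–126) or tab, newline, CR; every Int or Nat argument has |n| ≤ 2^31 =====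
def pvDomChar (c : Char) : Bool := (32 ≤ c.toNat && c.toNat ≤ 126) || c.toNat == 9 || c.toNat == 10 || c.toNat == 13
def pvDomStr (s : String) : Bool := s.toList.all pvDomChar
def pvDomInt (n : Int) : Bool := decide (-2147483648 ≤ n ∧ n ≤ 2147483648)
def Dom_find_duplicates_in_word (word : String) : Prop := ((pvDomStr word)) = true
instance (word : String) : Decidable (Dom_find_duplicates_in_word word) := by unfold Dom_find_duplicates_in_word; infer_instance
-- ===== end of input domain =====

-- B replaces A's dict-scanning loop with early return by a single length comparison of set(word) vs word (simpler; same behaviour).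
-- ===== PORT A =====
def findDupGo : List Char → PySem.Dict Char Int → Bool
  | [], _ => false
  | letter :: rest, d =>
    if d.contains letter then true
    else findDupGo rest (d.insert letter 1)

def find_duplicates_in_word (word : String) : Bool :=
  findDupGo word.toList PySem.Dict.empty

-- ===== PORT B =====
def find_duplicates_in_word_alt (word : String) : Bool :=
  decide ((PySem.Set.ofList word.toList).length ≠ word.toList.length)

-- ===== PRECONDITION & SPEC =====
def Spec_find_duplicates_in_word (word : String) (out : Bool) : Prop := out = find_duplicates_in_word_alt word
instance (word : String) (out : Bool) : Decidable (Spec_find_duplicates_in_word word out) := by unfold Spec_find_duplicates_in_word; infer_instance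

-- ===== CLAIM (what is proved, stated in full; the proofs are below) =====
def Claim_equal_find_duplicates_in_word : Prop := ∀ (word : String), Dom_find_duplicates_in_word word → Spec_find_duplicates_in_word word (find_duplicates_in_word word)

-- ===== LEMMAS AND PROOFS =====

-- ===== VERDICT (by name: the statement is the Claim_ definition above) =====
lemma findDupGo_iff (l : List Char) (d : PySem.Dict Char Int) :
    findDupGo l d = true ↔ (¬ l.Nodup ∨ ∃ x ∈ l, d.contains x = true) := by
  induction l generalizing d with
  | nil => simp [findDupGo]
  | cons c rest ih =>
    simp only [findDupGo]
    by_cases h : d.contains c = true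
    · rw [if_pos h]
      exact iff_of_true rfl (Or.inr ⟨c, by simp, h⟩)
    · rw [if_neg h, ih]
      have hc : ∀ x, (d.insert c (1:Int)).contains x = true ↔ (x = c ∨ d.contains x = true) := by
        intro x
        rw [PySem.Dict.contains_eq_isSome_get?]
        by_cases hx : x = c
        · subst hx; simp [PySem.Dict.get?_insert_self]
        · rw [PySem.Dict.get?_insert_of_ne _ _ (by exact hx),
              ← PySem.Dict.contains_eq_isSome_get?]
          simp [hx]
      have hnd : (¬ (c :: rest).Nodup) ↔ (c ∈ rest ∨ ¬ rest.Nodup) := by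
        simp [List.nodup_cons]; tauto
      constructor
      · rintro (hnd' | ⟨x, hx, hdx⟩)
        · exact Or.inl (hnd.mpr (Or.inr hnd'))
        · rcases (hc x).mp hdx with rfl | hdx'
          · exact Or.inl (hnd.mpr (Or.inl hx))
          · exact Or.inr ⟨x, List.mem_cons_of_mem _ hx, hdx'⟩
      · rintro (hnd' | ⟨x, hx, hdx⟩)
        · rcases hnd.mp hnd' with h1 | h1
          · exact Or.inr ⟨c, h1, (hc c).mpr (Or.inl rfl)⟩
          · exact Or.inl h1
        · rcases List.mem_cons.mp hx with rfl | hx'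
          · exact absurd hdx h
          · exact Or.inr ⟨x, hx', (hc x).mpr (Or.inr hdx)⟩

lemma length_ofList_eq_iff (l : List Char) :
    (PySem.Set.ofList l).length = l.length ↔ l.Nodup := by
  have h1 : (PySem.Set.ofList l).length = l.toFinset.card := by
    have hn := PySem.Set.nodup_ofList (xs := l)
    have : (PySem.Set.ofList l).toFinset = l.toFinset := by
      ext x; simp [List.mem_toFinset, PySem.Set.mem_ofList]
    rw [← List.toFinset_card_of_nodup hn, this]
  rw [h1]
  exact Multiset.toFinset_card_eq_card_iff_nodup

theorem find_duplicates_in_word_spec : Claim_equal_find_duplicates_in_word := by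
  intro word _
  show find_duplicates_in_word word = find_duplicates_in_word_alt word
  unfold find_duplicates_in_word find_duplicates_in_word_alt
  rw [Bool.eq_iff_iff, findDupGo_iff, decide_eq_true_iff]
  have hlen := length_ofList_eq_iff word.toList
  constructor
  · rintro (hnd | ⟨x, _, hdx⟩)
    · exact fun e => hnd (hlen.mp e)
    · exact absurd hdx (by simp [PySem.Dict.empty])
  · intro hne
    exact Or.inl (fun hnd => hne (hlen.mpr hnd))
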